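-- pv_equiv track=rewrite | github.com/yingl/LintCodeInPython | array-score.py | arrayScore
-- ===== SOURCE A (Python) =====
-- def arrayScore(nums, k, u, l):
--     # write your code here.
--     ret = 0
--     s = 0
--     for i in range(0, k):
--         s += nums[i]
--     if s < u:
--         ret += 1
--     if s > l:
--         ret -= 1
--     for i in range(k, len(nums)):
--         s += nums[i] - nums[i - k]
--         if s < u:
--             ret += 1
--         if s > l:
--             ret -= 1
--     return ret
-- ===== SOURCE B (Python) =====
-- def arrayScore(nums, k, u, l):
--     # Prefix-sum reformulation: each window sum is a difference of two prefix sums.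
--     prefix = [0]
--     for x in nums:
--         prefix.append(prefix[-1] + x)
--     ret = 0
--     for i in range(len(nums) - k + 1):
--         s = prefix[i + k] - prefix[i]
--         if s < u:
--             ret += 1
--         if s > l:
--             ret -= 1
--     return ret
-- ===== Notes on version B (the rewrite author's own statement) =====
-- stated objective: alternative
-- what changed: Replaces A's incrementally-maintained sliding sum (an init loop plus an update loop that adds nums[i] and subtracts nums[i-k]) with a prefix-sum array built once, each window sum then computed independently as prefix[i+k]-prefix[i] in a single loop over window starts.
import Mathlib
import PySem

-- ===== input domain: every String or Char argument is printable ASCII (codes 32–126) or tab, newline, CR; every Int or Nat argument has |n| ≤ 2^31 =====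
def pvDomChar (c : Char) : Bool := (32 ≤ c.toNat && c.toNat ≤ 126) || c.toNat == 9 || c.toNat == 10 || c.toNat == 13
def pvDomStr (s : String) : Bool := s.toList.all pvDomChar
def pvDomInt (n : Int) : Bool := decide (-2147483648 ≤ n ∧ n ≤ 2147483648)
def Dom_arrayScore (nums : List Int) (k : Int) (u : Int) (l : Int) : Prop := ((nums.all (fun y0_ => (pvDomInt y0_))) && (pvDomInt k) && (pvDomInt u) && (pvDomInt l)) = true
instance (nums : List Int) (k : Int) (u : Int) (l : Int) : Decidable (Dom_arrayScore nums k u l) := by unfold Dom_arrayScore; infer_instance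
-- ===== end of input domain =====

-- B change, one line: B replaces A's running sliding-window sum with a prefix-sum array and
-- independent per-window differences (alternative decomposition, same O(n) cost).

-- ===== PORT A =====
def arrayScore (nums : List Int) (k : Int) (u : Int) (l : Int) : Int :=
  let s0 : Int := (PySem.List.pyRange 0 k 1).foldl (fun s i => s + PySem.List.pyGetD nums i 0) 0
  let r0 : Int := if s0 < u then 0 + 1 else 0
  let r1 : Int := if s0 > l then r0 - 1 else r0
  let p := (PySem.List.pyRange k (nums.length : Int) 1).foldl
    (fun (st : Int × Int) i =>
      let s' := st.2 + PySem.List.pyGetD nums i 0 - PySem.List.pyGetD nums (i - k) 0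
      let r' := if s' < u then st.1 + 1 else st.1
      let r'' := if s' > l then r' - 1 else r'
      (r'', s'))
    (r1, s0)
  p.1

-- ===== PORT B =====
def arrayScore_alt (nums : List Int) (k : Int) (u : Int) (l : Int) : Int :=
  let pre := nums.foldl (fun acc x => acc ++ [PySem.List.pyGetD acc (-1) 0 + x]) [(0 : Int)]
  (PySem.List.pyRange 0 ((nums.length : Int) - k + 1) 1).foldl
    (fun r i =>
      let s := PySem.List.pyGetD pre (i + k) 0 - PySem.List.pyGetD pre i 0
      let r' := if s < u then r + 1 else r
      if s > l then r' - 1 else r')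
    0

-- ===== PRECONDITION & SPEC =====
-- Pre_ excludes exactly the inputs on which A raises IndexError: k < 0 or k > len(nums).
def Pre_arrayScore (nums : List Int) (k : Int) (u : Int) (l : Int) : Prop :=
  0 ≤ k ∧ k ≤ (nums.length : Int)
instance (nums : List Int) (k : Int) (u : Int) (l : Int) : Decidable (Pre_arrayScore nums k u l) := by
  unfold Pre_arrayScore; infer_instance

def pvWitness_arrayScore : List Int × Int × Int × Int := ([1, -2, 3], 2, 1, 0)

def Spec_arrayScore (nums : List Int) (k : Int) (u : Int) (l : Int) (out : Int) : Prop := out = arrayScore_alt nums k u l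
instance (nums : List Int) (k : Int) (u : Int) (l : Int) (out : Int) : Decidable (Spec_arrayScore nums k u l out) := by unfold Spec_arrayScore; infer_instance

-- ===== CLAIM (what is proved, stated in full; the proofs are below) =====
def Claim_equal_arrayScore : Prop := ∀ (nums : List Int) (k : Int) (u : Int) (l : Int), Dom_arrayScore nums k u l → Pre_arrayScore nums k u l → Spec_arrayScore nums k u l (arrayScore nums k u l)

-- ===== LEMMAS AND PROOFS =====

-- score of one window sum
def pvG (u l s : Int) : Int := (if s < u then 1 else 0) + (if s > l then -1 else 0)

-- window sum: sum of nums[j .. j+kn)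
def pvW (nums : List Int) (kn j : Nat) : Int := ((nums.drop j).take kn).sum

theorem pvG_eq (u l s r : Int) :
    (if s > l then (if s < u then r + 1 else r) - 1 else (if s < u then r + 1 else r))
      = r + pvG u l s := by
  unfold pvG; split_ifs <;> omega

-- first loop of A sums the first kn elements
theorem pv_sum_range (nums : List Int) : ∀ (m : Nat), m ≤ nums.length →
    (List.range m).foldl (fun s t => s + nums.getD t 0) 0 = (nums.take m).sum := by
  intro m
  induction m with
  | zero => simp
  | succ m ih =>
    intro hm
    have hmlt : m < nums.length := by omega
    rw [List.range_succ, List.foldl_append, ih (by omega)]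
    simp [List.getElem?_eq_getElem hmlt, List.getD, List.sum_take_succ _ _ hmlt]

-- prefix sums as a recursive list
def pvPsum (c : Int) : List Int → List Int
  | [] => []
  | x :: xs => (c + x) :: pvPsum (c + x) xs

theorem pv_foldl_psum (xs : List Int) : ∀ (A : List Int) (c : Int),
    PySem.List.pyGetD A (-1) 0 = c →
    xs.foldl (fun acc x => acc ++ [PySem.List.pyGetD acc (-1) 0 + x]) A = A ++ pvPsum c xs := by
  induction xs with
  | nil => intro A c _; simp [pvPsum]
  | cons x xs ih =>
    intro A c hc
    rw [List.foldl_cons, hc, ih (A ++ [c + x]) (c + x) (PySem.List.pyGetD_neg_one_append_singleton A (c + x) 0)]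
    simp [pvPsum]

theorem pv_psum_eq_map (xs : List Int) : ∀ (c : Int),
    pvPsum c xs = (List.range xs.length).map (fun j => c + (xs.take (j + 1)).sum) := by
  induction xs with
  | nil => intro c; simp [pvPsum]
  | cons x xs ih =>
    intro c
    rw [pvPsum, ih (c + x)]
    simp only [List.length_cons, List.range_succ_eq_map, List.map_cons, List.map_map]
    refine List.cons_eq_cons.mpr ⟨by simp, ?_⟩
    apply List.map_congr_left
    intro j _
    simp [List.sum_cons]
    ring

theorem pv_prefix_eq_map (nums : List Int) :
    nums.foldl (fun acc x => acc ++ [PySem.List.pyGetD acc (-1) 0 + x]) [(0 : Int)]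
      = (List.range (nums.length + 1)).map (fun j => (nums.take j).sum) := by
  rw [pv_foldl_psum nums [(0 : Int)] 0 (by simp [PySem.List.pyGetD, PySem.List.pyGet?, PySem.List.pyIdx?])]
  rw [pv_psum_eq_map]
  rw [List.range_succ_eq_map, List.map_cons, List.map_map]
  simp

-- windows via prefix differences
theorem pv_take_diff (nums : List Int) (kn j : Nat) :
    (nums.take (j + kn)).sum - (nums.take j).sum = pvW nums kn j := by
  rw [List.take_add, List.sum_append, pvW]
  ring

-- sliding-window step
theorem pv_window_step (nums : List Int) (kn j : Nat) (h : j + kn < nums.length) :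
    pvW nums kn j + nums.getD (j + kn) 0 - nums.getD j 0 = pvW nums kn (j + 1) := by
  have hj : j < nums.length := by omega
  have h1 : pvW nums kn j + nums.getD (j + kn) 0 = ((nums.drop j).take (kn + 1)).sum := by
    have hlt : kn < (nums.drop j).length := by simp; omega
    rw [List.sum_take_succ _ _ hlt, pvW, List.getElem_drop]
    simp [List.getD, List.getElem?_eq_getElem h]
  have h2 : ((nums.drop j).take (kn + 1)).sum = nums.getD j 0 + pvW nums kn (j + 1) := by
    rw [List.drop_eq_getElem_cons hj, List.take_succ_cons, List.sum_cons, pvW]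
    simp [List.getD, List.getElem?_eq_getElem hj]
  rw [h1, h2]; ring

theorem pv_getD_map_range (f : Nat → Int) (n m : Nat) (h : m < n) (d : Int) :
    (((List.range n).map f).getD m d) = f m := by
  rw [List.getD_eq_getElem?_getD]
  simp [h]

-- B equals the reference sum of window scores
theorem pv_alt_eq (nums : List Int) (k u l : Int) (kn : Nat) (hk : k = (kn : Int))
    (hkn : kn ≤ nums.length) :
    arrayScore_alt nums k u l
      = ((List.range (nums.length - kn + 1)).map (fun j => pvG u l (pvW nums kn j))).sum := by
  simp only [arrayScore_alt]
  rw [pv_prefix_eq_map, PySem.List.pyRange_one]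
  have hcast : (((nums.length : Int) - k + 1) - 0).toNat = nums.length - kn + 1 := by omega
  rw [hcast, List.foldl_map]
  rw [PySem.List.foldl_congr_mem (List.range (nums.length - kn + 1)) _
        (fun (r : Int) (t : Nat) => r + pvG u l (pvW nums kn t)) 0 ?_]
  · rw [PySem.List.foldl_add]
    simp
  · intro r t ht
    have ht' : t ≤ nums.length - kn := by
      have := List.mem_range.mp ht; omega
    simp only []
    have e1 : (0 : Int) + (t : Int) + k = ((t + kn : Nat) : Int) := by push_cast [hk]; ring
    have e2 : (0 : Int) + (t : Int) = ((t : Nat) : Int) := by ring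
    rw [e1, e2, PySem.List.pyGetD_natCast, PySem.List.pyGetD_natCast,
        pv_getD_map_range _ _ _ (by omega) 0, pv_getD_map_range _ _ _ (by omega) 0,
        pv_take_diff, pvG_eq]

-- A's second loop accumulates the remaining window scores
theorem pv_A_loop (nums : List Int) (k u l : Int) (kn : Nat) (hk : k = (kn : Int)) :
    ∀ (m j : Nat) (r s : Int), j + kn + m = nums.length → s = pvW nums kn j →
    ((PySem.List.pyRange ((j + kn : Nat) : Int) ((nums.length : Int)) 1).foldl
       (fun (st : Int × Int) i =>
         let s' := st.2 + PySem.List.pyGetD nums i 0 - PySem.List.pyGetD nums (i - k) 0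
         let r' := if s' < u then st.1 + 1 else st.1
         let r'' := if s' > l then r' - 1 else r'
         (r'', s'))
       (r, s)).1
     = r + ((List.range m).map (fun t => pvG u l (pvW nums kn (j + 1 + t)))).sum := by
  intro m
  induction m with
  | zero =>
    intro j r s hlen hs
    have : ((j + kn : Nat) : Int) = (nums.length : Int) := by omega
    rw [this, PySem.List.pyRange_one_eq_nil le_rfl, List.foldl_nil]
    simp
  | succ m ih =>
    intro j r s hlen hs
    have hlt : ((j + kn : Nat) : Int) < (nums.length : Int) := by omega
    rw [PySem.List.pyRange_one_cons hlt, List.foldl_cons]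
    simp only []
    have e1 : PySem.List.pyGetD nums ((j + kn : Nat) : Int) 0 = nums.getD (j + kn) 0 := by
      rw [PySem.List.pyGetD_natCast]
    have e2 : ((j + kn : Nat) : Int) - k = ((j : Nat) : Int) := by omega
    have e3 : PySem.List.pyGetD nums ((j : Nat) : Int) 0 = nums.getD j 0 := by
      rw [PySem.List.pyGetD_natCast]
    rw [e1, e2, e3, hs]
    have hstep : pvW nums kn j + nums.getD (j + kn) 0 - nums.getD j 0 = pvW nums kn (j + 1) :=
      pv_window_step nums kn j (by omega)
    rw [hstep, pvG_eq u l (pvW nums kn (j + 1)) r]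
    have e4 : ((j + kn : Nat) : Int) + 1 = (((j + 1) + kn : Nat) : Int) := by push_cast; ring
    rw [e4, ih (j + 1) (r + pvG u l (pvW nums kn (j + 1))) (pvW nums kn (j + 1)) (by omega) rfl]
    rw [List.range_succ_eq_map, List.map_cons, List.sum_cons, List.map_map]
    have e5 : ((fun t => pvG u l (pvW nums kn (j + 1 + t))) ∘ Nat.succ)
        = fun t => pvG u l (pvW nums kn (j + 1 + 1 + t)) := by
      funext t
      simp only [Function.comp]
      rw [show j + 1 + 1 + t = j + 1 + t.succ by omega]
    rw [e5]
    simp only [Nat.add_zero]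
    ring

-- A's first loop computes the first window sum
theorem pv_A_first (nums : List Int) (k : Int) (kn : Nat) (hk : k = (kn : Int))
    (hkn : kn ≤ nums.length) :
    (PySem.List.pyRange 0 k 1).foldl (fun s i => s + PySem.List.pyGetD nums i 0) 0
      = pvW nums kn 0 := by
  rw [PySem.List.pyRange_one]
  have hcast : ((k : Int) - 0).toNat = kn := by omega
  rw [hcast, List.foldl_map]
  have : (fun (s : Int) (t : Nat) => s + PySem.List.pyGetD nums ((0 : Int) + (t : Int)) 0)
      = fun s t => s + nums.getD t 0 := by
    funext s t
    rw [zero_add, PySem.List.pyGetD_natCast]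
  rw [this, pv_sum_range nums kn hkn]
  simp [pvW]

theorem arrayScore_spec : Claim_equal_arrayScore := by
  intro nums k u l _ hpre
  obtain ⟨hk0, hkle⟩ := hpre
  set kn := k.toNat with hknDef
  have hk : k = (kn : Int) := by omega
  have hkn : kn ≤ nums.length := by omega
  unfold Spec_arrayScore
  rw [pv_alt_eq nums k u l kn hk hkn]
  simp only [arrayScore]
  rw [pv_A_first nums k kn hk hkn]
  have hr1 : (if (pvW nums kn 0) > l then (if (pvW nums kn 0) < u then (0 : Int) + 1 else 0) - 1
      else (if (pvW nums kn 0) < u then (0 : Int) + 1 else 0)) = 0 + pvG u l (pvW nums kn 0) :=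
    pvG_eq u l (pvW nums kn 0) 0
  rw [hr1]
  have estart : k = ((0 + kn : Nat) : Int) := by push_cast; omega
  rw [show (PySem.List.pyRange k ((nums.length : Int)) 1) = PySem.List.pyRange ((0 + kn : Nat) : Int) ((nums.length : Int)) 1 by rw [← estart]]
  rw [pv_A_loop nums k u l kn hk (nums.length - kn) 0 (0 + pvG u l (pvW nums kn 0)) (pvW nums kn 0) (by omega) rfl]
  rw [List.range_succ_eq_map, List.map_cons, List.sum_cons, List.map_map]
  have : ((fun j => pvG u l (pvW nums kn j)) ∘ Nat.succ) = fun t => pvG u l (pvW nums kn (0 + 1 + t)) := by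
    funext t
    simp only [Function.comp]
    rw [show 0 + 1 + t = t.succ by omega]
  rw [this]
  simp only [Nat.zero_add]
  ring
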